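-- pv_equiv track=rewrite | github.com/miliar/Code_Jam_Webscraper | solutions_python/Problem_190/121.py | check
-- ===== SOURCE A (Python) =====
-- def check(perm):
--     if len(perm) == 1:
--         return True
--     if not perm:
--         raise ValueError
--     winners = []
--     #firsts = range(len(perm))[0::2]
--     firsts = range(0, len(perm), 2)
--     seconds = range(1, len(perm), 2)
--     for f, s in zip(firsts, seconds):
--         if perm[f] == perm[s]:
--             return False
--         summ = perm[f] + perm[s]
--         if summ == 3:
--             winners.append(1)
--         elif summ == 2:
--             winners.append(2)
--         elif summ == 1:
--             winners.append(0)
--         else: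
--             raise ValueError
--     return check(winners)
-- ===== SOURCE B (Python) =====
-- WINNER = {3: 1, 2: 2, 1: 0}
--
--
-- def check(perm):
--     if not perm:
--         raise ValueError
--     while len(perm) > 1:
--         winners = []
--         for f, s in zip(perm[::2], perm[1::2]):
--             if f == s:
--                 return False
--             w = WINNER.get(f + s)
--             if w is None:
--                 raise ValueError
--             winners.append(w)
--         perm = winners
--     return True
-- ===== Notes on version B (the rewrite author's own statement) =====
-- stated objective: simpler
-- what changed: Replaced the tail recursion over index ranges by an iterative while loop that zips the even/odd slices of the current round and looks the winner up in a table instead of an if/elif chain.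
import Mathlib
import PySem

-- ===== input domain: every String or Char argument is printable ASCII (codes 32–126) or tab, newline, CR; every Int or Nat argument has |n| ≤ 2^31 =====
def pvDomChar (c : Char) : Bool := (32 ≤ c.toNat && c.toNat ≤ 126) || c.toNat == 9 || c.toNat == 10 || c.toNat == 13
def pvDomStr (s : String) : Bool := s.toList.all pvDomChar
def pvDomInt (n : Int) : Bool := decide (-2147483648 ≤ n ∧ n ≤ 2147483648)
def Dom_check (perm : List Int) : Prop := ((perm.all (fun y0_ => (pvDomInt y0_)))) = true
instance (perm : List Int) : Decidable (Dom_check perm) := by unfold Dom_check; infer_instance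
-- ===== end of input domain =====

-- B replaces A's tail recursion over index ranges by a while loop zipping the
-- even/odd slices of the current round, with a table lookup for the winner (objective: simpler).

-- two-at-a-time list induction, used by the ports' termination lemmas and the proofs
theorem twoStepInd {P : List Int → Prop} (h0 : P []) (h1 : ∀ x, P [x])
    (h2 : ∀ f s rest, P rest → P (f :: s :: rest)) : ∀ l, P l := by
  have key : ∀ (n : ℕ) (l : List Int), l.length ≤ n → P l := by
    intro n
    induction n with
    | zero => intro l h; cases l with
      | nil => exact h0
      | cons a t => simp at h
    | succ n ih =>
      intro l h
      match l with
      | [] => exact h0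
      | [x] => exact h1 x
      | f :: s :: rest => exact h2 f s rest (ih rest (by simp at h; omega))
  intro l; exact key l.length l le_rfl

-- ===== PORT A =====
-- A's for-loop over zip(range(0,n,2), range(1,n,2)): consumes the list two
-- elements at a time; `.inl b` models an early `return b`, the unreachable
-- `raise ValueError` branch is modelled as `.inl false` (excluded by Pre_check).
def winnersA : List Int → Bool ⊕ List Int
  | [] => .inr []
  | [_] => .inr []          -- zip truncation: odd leftover element is dropped
  | f :: s :: rest =>
    if f = s then .inl false
    else
      let summ := f + s
      if summ = 3 then
        match winnersA rest with
        | .inl b => .inl b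
        | .inr w => .inr (1 :: w)
      else if summ = 2 then
        match winnersA rest with
        | .inl b => .inl b
        | .inr w => .inr (2 :: w)
      else if summ = 1 then
        match winnersA rest with
        | .inl b => .inl b
        | .inr w => .inr (0 :: w)
      else .inl false        -- raise ValueError (outside Pre_check)

theorem winnersA_len : ∀ (l : List Int), ∀ w, winnersA l = .inr w →
    2 * w.length ≤ l.length ∧ l.length ≤ 2 * w.length + 1 := by
  refine twoStepInd ?_ ?_ ?_
  · intro w h; simp [winnersA] at h; subst h; simp
  · intro x w h; simp [winnersA] at h; subst h; simp
  · intro f s rest ih w h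
    simp only [winnersA] at h
    split_ifs at h
    all_goals first
      | cases h
      | (revert h; cases hw : winnersA rest with
         | inl b => intro h; cases h
         | inr ws =>
           intro h
           simp only at h
           cases h
           have := ih ws hw
           simp; omega)

def check (perm : List Int) : Bool :=
  if perm.length = 1 then true
  else if perm = [] then false     -- raise ValueError (outside Pre_check)
  else
    match h : winnersA perm with
    | .inl b => b
    | .inr w => check w
termination_by perm.length
decreasing_by
  have := winnersA_len perm w h
  have : perm.length ≠ 0 := by simp_all
  omega

-- ===== PORT B =====
-- perm[::2] and perm[1::2]
def evensB : List Int → List Int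
  | [] => []
  | [x] => [x]
  | x :: _ :: rest => x :: evensB rest

def oddsB : List Int → List Int
  | [] => []
  | _ :: rest => evensB rest

-- WINNER.get(f + s)
def winnerTable (summ : Int) : Option Int :=
  if summ = 3 then some 1 else if summ = 2 then some 2
  else if summ = 1 then some 0 else none

-- the inner for-loop over zip(perm[::2], perm[1::2]); raise modelled as .inl false
def rowB : List (Int × Int) → Bool ⊕ List Int
  | [] => .inr []
  | (f, s) :: rest =>
    if f = s then .inl false
    else
      match winnerTable (f + s) with
      | none => .inl false   -- raise ValueError (outside Pre_check)
      | some w =>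
        match rowB rest with
        | .inl b => .inl b
        | .inr ws => .inr (w :: ws)

theorem rowB_len : ∀ (ps : List (Int × Int)) (w : List Int), rowB ps = .inr w →
    w.length = ps.length := by
  intro ps
  induction ps with
  | nil => intro w h; simp [rowB] at h; subst h; rfl
  | cons p rest ih =>
    intro w h
    obtain ⟨f, s⟩ := p
    by_cases h1 : f = s
    · simp [rowB, h1] at h
    · cases hw : winnerTable (f + s) with
      | none => simp [rowB, h1, hw] at h
      | some v =>
        cases hr : rowB rest with
        | inl b => simp [rowB, h1, hw, hr] at h
        | inr ws =>
          simp only [rowB, if_neg h1, hw, hr] at h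
          cases h
          simp [ih ws hr]

theorem evensB_len : ∀ (l : List Int), (evensB l).length = (l.length + 1) / 2 := by
  refine twoStepInd ?_ ?_ ?_
  · rfl
  · intro x; simp [evensB]
  · intro x y rest ih; simp [evensB, ih]; omega

theorem zip_eo_len (l : List Int) :
    ((evensB l).zip (oddsB l)).length = l.length / 2 := by
  cases l with
  | nil => rfl
  | cons x rest => simp [oddsB, List.length_zip, evensB_len]; omega

-- the while loop: runs rounds until one element is left
def loopB (perm : List Int) : Bool :=
  if perm.length > 1 then
    match h : rowB ((evensB perm).zip (oddsB perm)) with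
    | .inl b => b
    | .inr w => loopB w
  else true
termination_by perm.length
decreasing_by
  have h1 := rowB_len _ _ h
  have h2 := zip_eo_len perm
  omega

def check_alt (perm : List Int) : Bool :=
  if perm = [] then false          -- raise ValueError (outside Pre_check)
  else loopB perm

-- ===== PRECONDITION & SPEC =====
-- Exactly the inputs on which the Python A returns: A raises ValueError on the
-- empty list, and on a first-round pair (perm[2j], perm[2j+1]) that is distinct
-- with sum outside {1,2,3} unless an earlier equal first-round pair returns False
-- first (later rounds hold only values 0/1/2, so they never raise).
def Pre_check (perm : List Int) : Prop :=
  perm ≠ [] ∧ ∀ j < perm.length / 2,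
    (perm.getD (2 * j) 0 ≠ perm.getD (2 * j + 1) 0 ∧
      (perm.getD (2 * j) 0 + perm.getD (2 * j + 1) 0 < 1 ∨
        3 < perm.getD (2 * j) 0 + perm.getD (2 * j + 1) 0)) →
    ∃ i < j, perm.getD (2 * i) 0 = perm.getD (2 * i + 1) 0
instance (perm : List Int) : Decidable (Pre_check perm) := by unfold Pre_check; infer_instance

def pvWitness_check : List Int := [0, 1, 2, 1]

def Spec_check (perm : List Int) (out : Bool) : Prop := out = check_alt perm
instance (perm : List Int) (out : Bool) : Decidable (Spec_check perm out) := by unfold Spec_check; infer_instance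

-- ===== CLAIM (what is proved, stated in full; the proofs are below) =====
def Claim_equal_check : Prop := ∀ (perm : List Int), Dom_check perm → Pre_check perm → Spec_check perm (check perm)

-- ===== LEMMAS AND PROOFS =====

-- one round of A equals one round of B
theorem winnersA_eq_rowB : ∀ (l : List Int),
    winnersA l = rowB ((evensB l).zip (oddsB l)) := by
  refine twoStepInd ?_ ?_ ?_
  · rfl
  · intro x; rfl
  · intro f s rest ih
    have hz : (evensB (f :: s :: rest)).zip (oddsB (f :: s :: rest))
        = (f, s) :: (evensB rest).zip (oddsB rest) := by
      cases rest with
      | nil => rfl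
      | cons a tl => cases tl <;> rfl
    rw [hz]
    simp only [winnersA, rowB, winnerTable, ih]
    split_ifs <;> rfl

theorem check_eq_loopB : ∀ (n : ℕ) (l : List Int), l.length ≤ n → l ≠ [] →
    check l = loopB l := by
  intro n
  induction n with
  | zero =>
    intro l hl hne
    cases l with
    | nil => exact absurd rfl hne
    | cons a t => simp at hl
  | succ n ih =>
    intro l hl hne
    by_cases h1 : l.length = 1
    · rw [check, loopB]; simp [h1]
    · have hlen : 1 < l.length := by
        cases l with
        | nil => exact absurd rfl hne
        | cons a t => simp only [List.length_cons] at h1 ⊢; omega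
      rw [check, loopB]
      simp only [h1, if_false, if_neg hne, if_pos hlen]
      rw [← winnersA_eq_rowB]
      cases hw : winnersA l with
      | inl b => rfl
      | inr w =>
        have hlenw := winnersA_len l w hw
        have hwne : w ≠ [] := by
          intro h; subst h; simp at hlenw; omega
        exact ih w (by omega) hwne

-- ===== VERDICT (by name: the statement is the Claim_ definition above) =====
theorem check_spec : Claim_equal_check := by
  intro perm _ hpre
  unfold Spec_check check_alt
  rw [if_neg hpre.1]
  exact check_eq_loopB perm.length perm le_rfl hpre.1
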